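-- pv_equiv track=rewrite | github.com/Bjarni123/HR_24H | strjal_staerdfraedi/einstaklings_verkefni/einstaklingverkefni5/relations.py | composite_relations
-- ===== SOURCE A (Python) =====
-- def composite_relations(relation1, relation2):
--     # Create a list to hold values to return
--     return_value = list()
--
--     # Loop through the first relation
--     for relation1_element in relation1:
--
--         # Take the values and store them in variables
--         relation1_value1 = relation1_element[0]
--         relation1_value2 = relation1_element[1]
--
--         # Loop throught the second relation
--         for relation2_element in relation2:
--
--             # Store the necessary values
--             relation2_value1 = relation2_element[0]
--             relation2_value2 = relation2_element[1]
--
--             # If the last value in the first set is the same as the first in the second one...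
--             if relation1_value2 == relation2_value1:
--                 # I create the tuple to append
--                 element_to_append = (relation1_value1, relation2_value2)
--                 # and if the tuple is not already in the list
--                 if element_to_append not in return_value:
--                     # I append it
--                     return_value.append(element_to_append)
--
--     # Then return the list of elements
--     return return_value
-- ===== SOURCE B (Python) =====
-- def composite_relations(relation1, relation2):
--     # Index relation2 by its first component: one pass, then O(1) lookups.
--     index = {}
--     for c, d in relation2:
--         index.setdefault(c, []).append(d)
--
--     seen = set()
--     return_value = []
--     for a, b in relation1:
--         for d in index.get(b, []):
--             pair = (a, d)
--             if pair not in seen: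
--                 seen.add(pair)
--                 return_value.append(pair)
--     return return_value
-- ===== Notes on version B (the rewrite author's own statement) =====
-- stated objective: faster
-- what changed: Replaced the nested scan of relation2 plus list-membership dedup by a one-pass dict index of relation2 keyed on first component and a set for O(1) dedup.
import Mathlib
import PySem

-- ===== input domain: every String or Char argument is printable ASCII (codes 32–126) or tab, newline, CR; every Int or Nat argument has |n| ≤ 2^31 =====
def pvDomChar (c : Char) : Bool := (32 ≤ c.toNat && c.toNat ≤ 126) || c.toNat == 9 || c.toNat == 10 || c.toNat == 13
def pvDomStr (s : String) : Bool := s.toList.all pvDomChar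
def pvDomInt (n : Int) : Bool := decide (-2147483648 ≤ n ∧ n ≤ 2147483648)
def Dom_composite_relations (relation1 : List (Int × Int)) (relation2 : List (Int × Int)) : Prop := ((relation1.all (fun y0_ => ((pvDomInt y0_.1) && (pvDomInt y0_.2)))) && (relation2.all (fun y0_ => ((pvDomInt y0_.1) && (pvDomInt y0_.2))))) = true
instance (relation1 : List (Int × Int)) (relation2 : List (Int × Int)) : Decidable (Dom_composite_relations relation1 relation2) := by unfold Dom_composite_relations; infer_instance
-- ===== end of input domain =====

-- B replaces A's nested rescan of relation2 and list-membership dedup by a dict index of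
-- relation2 (built once) and a set for dedup: asymptotically faster, same output.


-- ===== PORT A =====
-- A: for each pair of relation1, scan all of relation2; append the composed pair if not already present.
def composite_relations (relation1 : List (Int × Int)) (relation2 : List (Int × Int)) : List (Int × Int) :=
  relation1.foldl (fun return_value p =>
    relation2.foldl (fun return_value q =>
      if p.2 == q.1 then
        if (p.1, q.2) ∈ return_value then return_value else return_value ++ [(p.1, q.2)]
      else return_value) return_value) []

-- ===== PORT B =====
-- B: index relation2 by first component (dict of lists), then one pass over relation1 with a seen-set.
def composite_relations_alt (relation1 : List (Int × Int)) (relation2 : List (Int × Int)) : List (Int × Int) :=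
  let index : PySem.Dict Int (List Int) :=
    relation2.foldl (fun d q => d.modify q.1 [] (· ++ [q.2])) PySem.Dict.empty
  let st := relation1.foldl (fun st p =>
      (index.getD p.2 []).foldl (fun st d =>
        if (p.1, d) ∈ st.1 then st
        else (PySem.Set.add st.1 (p.1, d), st.2 ++ [(p.1, d)])) st)
    (([] : PySem.Set (Int × Int)), ([] : List (Int × Int)))
  st.2

-- ===== PRECONDITION & SPEC =====
def Spec_composite_relations (relation1 : List (Int × Int)) (relation2 : List (Int × Int)) (out : List (Int × Int)) : Prop := out = composite_relations_alt relation1 relation2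
instance (relation1 : List (Int × Int)) (relation2 : List (Int × Int)) (out : List (Int × Int)) : Decidable (Spec_composite_relations relation1 relation2 out) := by unfold Spec_composite_relations; infer_instance

-- ===== CLAIM (what is proved, stated in full; the proofs are below) =====
def Claim_equal_composite_relations : Prop := ∀ (relation1 : List (Int × Int)) (relation2 : List (Int × Int)), Dom_composite_relations relation1 relation2 → Spec_composite_relations relation1 relation2 (composite_relations relation1 relation2)

-- ===== LEMMAS AND PROOFS =====

-- A's inner scan of relation2 equals a dedup-append fold over just the matching second components.
theorem innerA_eq_matched (r2 : List (Int × Int)) (a b : Int) :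
    ∀ acc : List (Int × Int),
      r2.foldl (fun acc q =>
        if b == q.1 then
          if (a, q.2) ∈ acc then acc else acc ++ [(a, q.2)]
        else acc) acc
      = ((r2.filter (fun q => q.1 == b)).map (·.2)).foldl
          (fun acc d => if (a, d) ∈ acc then acc else acc ++ [(a, d)]) acc := by
  induction r2 with
  | nil => intro acc; rfl
  | cons q r2 ih =>
    intro acc
    simp only [List.foldl, List.filter_cons]
    by_cases h : q.1 = b
    · have hb : (b == q.1) = true := by simp [h]
      have hb' : (q.1 == b) = true := by simp [h]
      rw [hb, hb']
      simp only [if_true, List.map_cons, List.foldl_cons]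
      exact ih _
    · have hb : (b == q.1) = false := by simp [Ne.symm h]
      have hb' : (q.1 == b) = false := by simp [h]
      rw [hb, hb']
      simp only [if_false, Bool.false_eq_true]
      exact ih _

-- B's state invariant: seen-set and output list have the same members, and the output column
-- of B's fold computes exactly A's dedup-append fold.
theorem inner_state (lst : List Int) (a : Int) :
    ∀ (s o : List (Int × Int)), (∀ x, x ∈ s ↔ x ∈ o) →
      ((lst.foldl (fun st d =>
          if (a, d) ∈ st.1 then st
          else (PySem.Set.add st.1 (a, d), st.2 ++ [(a, d)])) (s, o)).2
        = lst.foldl (fun acc d => if (a, d) ∈ acc then acc else acc ++ [(a, d)]) o)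
      ∧ (∀ x, x ∈ (lst.foldl (fun st d =>
          if (a, d) ∈ st.1 then st
          else (PySem.Set.add st.1 (a, d), st.2 ++ [(a, d)])) (s, o)).1 ↔
            x ∈ (lst.foldl (fun st d =>
          if (a, d) ∈ st.1 then st
          else (PySem.Set.add st.1 (a, d), st.2 ++ [(a, d)])) (s, o)).2) := by
  induction lst with
  | nil => intro s o h; exact ⟨rfl, h⟩
  | cons d lst ih =>
    intro s o h
    by_cases hm : (a, d) ∈ s
    · have hmo : (a, d) ∈ o := (h _).mp hm
      simpa [List.foldl, hm, hmo] using ih s o h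
    · have hmo : (a, d) ∉ o := fun hx => hm ((h _).mpr hx)
      have hinv : ∀ x, x ∈ PySem.Set.add s (a, d) ↔ x ∈ o ++ [(a, d)] := by
        intro x
        simp [PySem.Set.mem_add, h x, or_comm]
      simpa [List.foldl, hm, hmo] using ih (PySem.Set.add s (a, d)) (o ++ [(a, d)]) hinv

theorem outer_state (r1 : List (Int × Int)) (f : Int → List Int) :
    ∀ (s o : List (Int × Int)), (∀ x, x ∈ s ↔ x ∈ o) →
      (r1.foldl (fun st p =>
          (f p.2).foldl (fun st d =>
            if (p.1, d) ∈ st.1 then st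
            else (PySem.Set.add st.1 (p.1, d), st.2 ++ [(p.1, d)])) st) (s, o)).2
        = r1.foldl (fun acc p =>
            (f p.2).foldl (fun acc d => if (p.1, d) ∈ acc then acc else acc ++ [(p.1, d)]) acc) o := by
  induction r1 with
  | nil => intro s o _; rfl
  | cons p r1 ih =>
    intro s o h
    have hst := inner_state (f p.2) p.1 s o h
    have hpair : (f p.2).foldl (fun st d =>
        if (p.1, d) ∈ st.1 then st
        else (PySem.Set.add st.1 (p.1, d), st.2 ++ [(p.1, d)])) (s, o)
        = ((((f p.2).foldl (fun st d =>
        if (p.1, d) ∈ st.1 then st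
        else (PySem.Set.add st.1 (p.1, d), st.2 ++ [(p.1, d)])) (s, o)).1),
          (f p.2).foldl (fun acc d => if (p.1, d) ∈ acc then acc else acc ++ [(p.1, d)]) o) := by
      rw [← hst.1]
    simp only [List.foldl]
    rw [hpair]
    exact ih _ _ (by simpa [← hst.1] using hst.2)

-- ===== VERDICT (by name: the statement is the Claim_ definition above) =====
theorem composite_relations_spec : Claim_equal_composite_relations := by
  intro r1 r2 _
  unfold Spec_composite_relations composite_relations composite_relations_alt
  have hidx : ∀ b : Int,
      (r2.foldl (fun d q => d.modify q.1 [] (· ++ [q.2])) PySem.Dict.empty).getD b []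
        = (r2.filter (fun q => q.1 == b)).map (·.2) := by
    intro b
    simpa using PySem.Dict.getD_foldl_modify_append r2 PySem.Dict.empty b
  simp only [hidx]
  rw [outer_state r1 (fun b => (r2.filter (fun q => q.1 == b)).map (·.2)) [] []
      (fun _ => Iff.rfl)]
  have hfun : (fun (acc : List (Int × Int)) (p : Int × Int) =>
      r2.foldl (fun acc q =>
        if p.2 == q.1 then
          if (p.1, q.2) ∈ acc then acc else acc ++ [(p.1, q.2)]
        else acc) acc)
      = (fun (acc : List (Int × Int)) (p : Int × Int) =>
        ((r2.filter (fun q => q.1 == p.2)).map (·.2)).foldl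
          (fun acc d => if (p.1, d) ∈ acc then acc else acc ++ [(p.1, d)]) acc) := by
    funext acc p
    exact innerA_eq_matched r2 p.1 p.2 acc
  rw [hfun]
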